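-- pv_equiv track=rewrite | github.com/soongensayo/gedi-hotel-assistant | camera-and-nfc/Identification-and-payment-app/core/scanner.py | _pick_luhn_card_number
-- ===== SOURCE A (Python) =====
-- from typing import Optional, Dict, Any, Tuple, List, Set
--
-- def _luhn_check(card_num: str) -> bool:
--     """Return True if the card number passes the Luhn checksum."""
--     if not card_num or not card_num.isdigit():
--         return False
--     total = 0
--     for i, digit in enumerate(reversed(card_num)):
--         n = int(digit)
--         if i % 2 == 1:
--             n *= 2
--             if n > 9:
--                 n -= 9
--         total += n
--     return total % 10 == 0
--
-- def _pick_luhn_card_number(digits_only: list, all_digits: Optional[str] = None) -> Optional[str]: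
--     """When there are multiple digit runs (e.g. junk + real number), pick the one that passes Luhn."""
--     candidates = []
--     for s in digits_only or []:
--         if 13 <= len(s) <= 19:
--             candidates.append(s)
--     if all_digits and len(all_digits) >= 16:
--         for i in range(len(all_digits) - 15):
--             candidates.append(all_digits[i : i + 16])
--     for c in candidates:
--         if len(c) == 16:
--             if _luhn_check(c):
--                 return c
--             corr = _try_correct_card_number_ocr(c)
--             if corr is not None:
--                 return corr
--     for c in candidates:
--         if len(c) != 16 and 13 <= len(c) <= 19:
--             if _luhn_check(c):
--                 return c
--     valid_len = [c for c in candidates if 13 <= len(c) <= 19]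
--     return max(valid_len, key=lambda s: (len(s) == 16, len(s))) if valid_len else None
--
-- def _try_correct_card_number_ocr(card_no: str) -> Optional[str]:
--     """If OCR misread a digit, try common confusions (1/7, 0/8, 5/6, etc.) and return a version that passes Luhn."""
--     if not card_no or len(card_no) != 16 or not card_no.isdigit():
--         return None
--     if _luhn_check(card_no):
--         return card_no
--     # Common OCR digit confusions
--     confusions = {"0": "86", "1": "7", "2": "7", "3": "85", "4": "9", "5": "6", "6": "5", "7": "1", "8": "03", "9": "4"}
--     digits = list(card_no)
--     for i in range(16):
--         orig = digits[i]
--         for c in confusions.get(orig, ""):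
--             digits[i] = c
--             candidate = "".join(digits)
--             if _luhn_check(candidate):
--                 return candidate
--         digits[i] = orig
--     return None
-- ===== SOURCE B (Python) =====
-- from typing import Optional
--
-- def _luhn_check(card_num: str) -> bool:
--     """Return True if the card number passes the Luhn checksum."""
--     if not card_num or not card_num.isdigit():
--         return False
--     total = 0
--     for i, digit in enumerate(reversed(card_num)):
--         n = int(digit)
--         if i % 2 == 1:
--             n *= 2
--             if n > 9:
--                 n -= 9
--         total += n
--     return total % 10 == 0
--
-- def _try_correct_card_number_ocr(card_no: str) -> Optional[str]:
--     """If OCR misread a digit, try common confusions and return a version that passes Luhn."""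
--     if not card_no or len(card_no) != 16 or not card_no.isdigit():
--         return None
--     if _luhn_check(card_no):
--         return card_no
--     confusions = {"0": "86", "1": "7", "2": "7", "3": "85", "4": "9", "5": "6", "6": "5", "7": "1", "8": "03", "9": "4"}
--     digits = list(card_no)
--     for i in range(16):
--         orig = digits[i]
--         for c in confusions.get(orig, ""):
--             digits[i] = c
--             candidate = "".join(digits)
--             if _luhn_check(candidate):
--                 return candidate
--         digits[i] = orig
--     return None
--
-- def _pick_luhn_card_number(digits_only: list, all_digits: Optional[str] = None) -> Optional[str]:
--     """Single pass over the candidates instead of three sequential scans."""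
--     candidates = [s for s in (digits_only or []) if 13 <= len(s) <= 19]
--     if all_digits and len(all_digits) >= 16:
--         candidates.extend(all_digits[i : i + 16] for i in range(len(all_digits) - 15))
--     first_non16 = None
--     best = None
--     for c in candidates:
--         if len(c) == 16:
--             if _luhn_check(c):
--                 return c
--             corr = _try_correct_card_number_ocr(c)
--             if corr is not None:
--                 return corr
--         elif first_non16 is None and _luhn_check(c):
--             first_non16 = c
--         key = (len(c) == 16, len(c))
--         if best is None or key > (len(best) == 16, len(best)):
--             best = c
--     return first_non16 if first_non16 is not None else best
-- ===== Notes on version B (the rewrite author's own statement) =====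
-- stated objective: alternative
-- what changed: A's three sequential scans over the candidate list (16-length Luhn/OCR scan, then non-16 Luhn scan, then a max over valid lengths) are merged into one pass that returns early on a 16-length hit, records the first non-16 Luhn-valid candidate, and maintains the running fallback best under the key (len==16, len).
import Mathlib
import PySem

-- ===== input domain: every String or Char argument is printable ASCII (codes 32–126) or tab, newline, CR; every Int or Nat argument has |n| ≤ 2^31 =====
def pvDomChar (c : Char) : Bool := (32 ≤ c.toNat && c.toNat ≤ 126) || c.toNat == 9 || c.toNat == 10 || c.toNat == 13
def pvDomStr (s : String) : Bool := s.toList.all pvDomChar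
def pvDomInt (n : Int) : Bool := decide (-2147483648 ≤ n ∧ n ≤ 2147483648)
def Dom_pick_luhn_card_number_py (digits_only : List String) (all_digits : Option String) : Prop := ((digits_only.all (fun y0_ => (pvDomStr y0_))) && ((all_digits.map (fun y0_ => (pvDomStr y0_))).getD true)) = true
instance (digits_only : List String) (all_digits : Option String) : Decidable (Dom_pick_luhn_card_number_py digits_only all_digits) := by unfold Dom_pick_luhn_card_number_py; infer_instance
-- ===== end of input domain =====

-- B replaces A's three sequential scans over the candidate list by a single pass that
-- returns early on a length-16 hit, records the first non-16 Luhn hit, and maintains the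
-- running fallback best under the key (len==16, len)  (objective: alternative decomposition).


-- ===== PORT A =====
-- _luhn_check (module helper, shared by both ports).  int(digit) on a single digit char is
-- its code minus 48 (exact: isdigit has already guaranteed every char is '0'..'9').
def pvLuhn (card : String) : Bool :=
  if card.toList = [] ∨ ¬ PySem.Str.strIsdigit card then false
  else
    let total : Int :=
      (PySem.List.enumerate card.toList.reverse 0).foldl
        (fun total p =>
          let n : Int := (p.2.toNat : Int) - 48
          let n := if PySem.Int.mod p.1 2 == 1 then (if n * 2 > 9 then n * 2 - 9 else n * 2) else n
          total + n) 0
    PySem.Int.mod total 10 == 0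

-- confusions.get(c, "") as a function (the dict is a literal constant)
def pvConf (c : Char) : List Char :=
  match c with
  | '0' => ['8', '6'] | '1' => ['7'] | '2' => ['7'] | '3' => ['8', '5'] | '4' => ['9']
  | '5' => ['6'] | '6' => ['5'] | '7' => ['1'] | '8' => ['0', '3'] | '9' => ['4']
  | _ => []

-- inner 'for c in confusions.get(orig, "")'; Python writes digits[i]=c and joins:
-- that candidate IS the original list with position i replaced (digits[i] is restored
-- before the next i), so List.set is exact.
def pvOcrInner (ds : List Char) (i : Nat) : List Char → Option String
  | [] => none
  | c :: rest =>
    let candidate := String.ofList (ds.set i c)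
    if pvLuhn candidate then some candidate else pvOcrInner ds i rest

-- outer 'for i in range(16)'; digits[i] via getD is exact: i < 16 = len(digits) here.
def pvOcrScan (ds : List Char) : List Nat → Option String
  | [] => none
  | i :: rest =>
    match pvOcrInner ds i (pvConf (ds.getD i ' ')) with
    | some r => some r
    | none => pvOcrScan ds rest

-- _try_correct_card_number_ocr (module helper, shared by both ports)
def pvOcr (card : String) : Option String :=
  if card.toList = [] ∨ card.length ≠ 16 ∨ ¬ PySem.Str.strIsdigit card then none
  else if pvLuhn card then some card
  else pvOcrScan card.toList (List.range 16)

-- keys of A's max / B's running best: (len(s) == 16, len(s))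
def pvK1 (s : String) : Bool := s.length == 16
def pvK2 (s : String) : Nat := s.length

-- A's candidate building: the first loop appends, then windows of all_digits are appended.
-- 'all_digits and len(all_digits) >= 16': the truthiness test is subsumed by len >= 16.
-- all_digits[i:i+16] with 0 <= i and i+16 <= len is exactly drop i / take 16.
def pvCandA (digits_only : List String) (all_digits : Option String) : List String :=
  let c1 := digits_only.foldl
    (fun acc s => if 13 ≤ s.length ∧ s.length ≤ 19 then acc ++ [s] else acc) []
  match all_digits with
  | none => c1
  | some s =>
    if 16 ≤ s.length then
      (List.range (s.length - 15)).foldl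
        (fun acc i => acc ++ [String.ofList ((s.toList.drop i).take 16)]) c1
    else c1

-- A's second loop: first non-16 candidate of valid length that passes Luhn
def pvScan2 : List String → Option String
  | [] => none
  | c :: rest =>
    if c.length ≠ 16 ∧ 13 ≤ c.length ∧ c.length ≤ 19 then
      (if pvLuhn c then some c else pvScan2 rest)
    else pvScan2 rest

-- A's first loop: length-16 candidates, Luhn then OCR correction
def pvScan1 : List String → Option String
  | [] => none
  | c :: rest =>
    if c.length = 16 then
      (if pvLuhn c then some c
       else match pvOcr c with
            | some r => some r
            | none => pvScan1 rest)
    else pvScan1 rest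

def pick_luhn_card_number_py (digits_only : List String) (all_digits : Option String) : Option String :=
  let candidates := pvCandA digits_only all_digits
  match pvScan1 candidates with
  | some r => some r
  | none =>
    match pvScan2 candidates with
    | some r => some r
    | none =>
      let valid_len := candidates.filter (fun c => decide (13 ≤ c.length ∧ c.length ≤ 19))
      PySem.List.max2? valid_len pvK1 pvK2   -- max(valid_len, key=lambda s: (len(s)==16, len(s))) if valid_len else None

-- ===== PORT B =====
-- Python's tuple '>' on ((len==16), len): lexicographic, False < True
def pvKeyGT (x m : String) : Bool :=
  decide (pvK1 m < pvK1 x) || (!decide (pvK1 x < pvK1 m) && decide (pvK2 m < pvK2 x))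

-- 'if best is None or key(c) > key(best): best = c'
def pvUpd (best : Option String) (x : String) : Option String :=
  match best with
  | none => some x
  | some m => if pvKeyGT x m then some x else some m

-- B's single pass with accumulators first_non16 / best
def pvLoop : List String → Option String → Option String → Option String
  | [], hit, best => (match hit with | some h => some h | none => best)
  | c :: rest, hit, best =>
    if c.length = 16 then
      (if pvLuhn c then some c
       else match pvOcr c with
            | some r => some r
            | none => pvLoop rest hit (pvUpd best c))
    else
      pvLoop rest (if hit.isNone && pvLuhn c then some c else hit) (pvUpd best c)

-- B's candidate building: comprehension + extend of the 16-windows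
def pvCandB (digits_only : List String) (all_digits : Option String) : List String :=
  digits_only.filter (fun s => decide (13 ≤ s.length ∧ s.length ≤ 19)) ++
  (match all_digits with
   | none => []
   | some s =>
     if 16 ≤ s.length then
       (List.range (s.length - 15)).map (fun i => String.ofList ((s.toList.drop i).take 16))
     else [])

def pick_luhn_card_number_py_alt (digits_only : List String) (all_digits : Option String) : Option String :=
  pvLoop (pvCandB digits_only all_digits) none none

-- ===== PRECONDITION & SPEC =====
def Spec_pick_luhn_card_number_py (digits_only : List String) (all_digits : Option String) (out : Option String) : Prop := out = pick_luhn_card_number_py_alt digits_only all_digits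
instance (digits_only : List String) (all_digits : Option String) (out : Option String) : Decidable (Spec_pick_luhn_card_number_py digits_only all_digits out) := by unfold Spec_pick_luhn_card_number_py; infer_instance

-- ===== CLAIM (what is proved, stated in full; the proofs are below) =====
def Claim_equal_pick_luhn_card_number_py : Prop := ∀ (digits_only : List String) (all_digits : Option String), Dom_pick_luhn_card_number_py digits_only all_digits → Spec_pick_luhn_card_number_py digits_only all_digits (pick_luhn_card_number_py digits_only all_digits)

-- ===== LEMMAS AND PROOFS =====

-- both ports build the same candidate list
lemma pvCand_eq (d : List String) (a : Option String) : pvCandA d a = pvCandB d a := by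
  unfold pvCandA pvCandB
  cases a with
  | none => simp [PySem.List.foldl_append_ite_eq_filter]
  | some s =>
    by_cases h : 16 ≤ s.length
    · simp only [if_pos h, PySem.List.foldl_append_singleton_eq_map,
        PySem.List.foldl_append_ite_eq_filter, List.nil_append]
    · simp [if_neg h, PySem.List.foldl_append_ite_eq_filter]

-- every candidate has length 13..19 (filtered entries by the filter; windows have length 16)
lemma pvCand_inv (d : List String) (a : Option String) :
    ∀ c ∈ pvCandB d a, 13 ≤ c.length ∧ c.length ≤ 19 := by
  intro c hc
  unfold pvCandB at hc
  rcases List.mem_append.mp hc with h | h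
  · have := List.of_mem_filter h
    simpa using this
  · cases a with
    | none => simp at h
    | some s =>
      by_cases h16 : 16 ≤ s.length
      · simp only [h16, if_true, List.mem_map, List.mem_range] at h
        obtain ⟨i, hi, rfl⟩ := h
        have : ((s.toList.drop i).take 16).length = 16 := by
          simp [List.length_take, List.length_drop]; omega
        simp [this]
      · simp [h16] at h

-- A's fallback max equals a foldl of B's best-update over the same list
lemma pvMax_eq_foldl (cs : List String) :
    PySem.List.max2? cs pvK1 pvK2 = cs.foldl pvUpd none := by
  unfold PySem.List.max2?
  congr 1
  funext acc x
  cases acc with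
  | none => rfl
  | some m => simp [pvUpd, pvKeyGT]

-- the single pass equals the three scans, for any list of 13..19-length candidates
lemma pvLoop_eq (cs : List String)
    (hinv : ∀ c ∈ cs, 13 ≤ c.length ∧ c.length ≤ 19) :
    ∀ hit best, pvLoop cs hit best =
      (pvScan1 cs).or ((hit.or (pvScan2 cs)).or (cs.foldl pvUpd best)) := by
  induction cs with
  | nil => intro hit best; cases hit <;> simp [pvLoop, pvScan1, pvScan2]
  | cons c rest ih =>
    intro hit best
    have hc := hinv c (by simp)
    have hrest : ∀ x ∈ rest, 13 ≤ x.length ∧ x.length ≤ 19 :=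
      fun x hx => hinv x (by simp [hx])
    by_cases h16 : c.length = 16
    · by_cases hl : pvLuhn c
      · simp [pvLoop, pvScan1, h16, hl]
      · cases hocr : pvOcr c with
        | some r => simp [pvLoop, pvScan1, h16, hl, hocr]
        | none =>
          have h2 : pvScan2 (c :: rest) = pvScan2 rest := by
            simp [pvScan2, h16]
          simp only [pvLoop, pvScan1, h16, hl, hocr, if_true, if_false, Bool.false_eq_true, h2]
          simpa using ih hrest hit (pvUpd best c)
    · have h1 : pvScan1 (c :: rest) = pvScan1 rest := by simp [pvScan1, h16]
      have hcond : c.length ≠ 16 ∧ 13 ≤ c.length ∧ c.length ≤ 19 :=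
        ⟨h16, hc.1, hc.2⟩
      by_cases hl : pvLuhn c
      · have h2 : pvScan2 (c :: rest) = some c := by simp [pvScan2, hcond, hl]
        cases hit with
        | none =>
          simp only [pvLoop, h16, if_false, Option.isNone_none, hl, Bool.true_and, ite_true, h1, h2]
          rw [ih hrest]
          cases hs1 : pvScan1 rest <;> simp [Option.or]
        | some h =>
          simp only [pvLoop, h16, if_false, Option.isNone_some, hl, Bool.false_and,
            Bool.false_eq_true, h1, h2]
          rw [ih hrest]
          simp [Option.or]
      · have h2 : pvScan2 (c :: rest) = pvScan2 rest := by
          simp [pvScan2, hcond, hl]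
        simp only [pvLoop, h16, if_false, hl, Bool.and_false, Bool.false_eq_true, h1, h2]
        rw [ih hrest]
        simp

-- ===== VERDICT (by name: the statement is the Claim_ definition above) =====
theorem pick_luhn_card_number_py_spec : Claim_equal_pick_luhn_card_number_py := by
  intro d a _
  unfold Spec_pick_luhn_card_number_py
  unfold pick_luhn_card_number_py pick_luhn_card_number_py_alt
  rw [pvCand_eq]
  set cs := pvCandB d a with hcs
  have hinv := pvCand_inv d a
  have hfilter : cs.filter (fun c => decide (13 ≤ c.length) && decide (c.length ≤ 19)) = cs :=
    List.filter_eq_self.mpr (fun c hc => by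
      have := hinv c hc; simp [this.1, this.2])
  rw [pvLoop_eq cs hinv none none]
  cases hs1 : pvScan1 cs <;> cases hs2 : pvScan2 cs <;>
    simp [hs1, hs2, hfilter, pvMax_eq_foldl, Option.or]
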